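-- pv_equiv track=rewrite | github.com/MrBrantCode/unitest_baseline | mut_generate/mist_train_cf/cf_1261/solution.py | remove_and_rearrange
-- ===== SOURCE A (Python) =====
-- def remove_and_rearrange(numbers):
--     removed_elements = []
--     even_numbers = []
--     odd_numbers = []
--
--     for num in numbers:
--         if num == 3:
--             removed_elements.append(num)
--         elif num % 2 == 0:
--             even_numbers.append(num)
--         else:
--             odd_numbers.append(num)
--
--     even_numbers = sorted(set(even_numbers))
--     odd_numbers = sorted(set(odd_numbers), reverse=True)
--
--     return (even_numbers + odd_numbers, removed_elements)
-- ===== SOURCE B (Python) =====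
-- def remove_and_rearrange(numbers):
--     removed_elements = [n for n in numbers if n == 3]
--     s = sorted(set(n for n in numbers if n != 3))
--     evens = [x for x in s if x % 2 == 0]
--     odds = [x for x in reversed(s) if x % 2 != 0]
--     return (evens + odds, removed_elements)
-- ===== Notes on version B (the rewrite author's own statement) =====
-- stated objective: alternative
-- what changed: One sort of a single deduplicated set of the non-3 values, read off twice (forward for evens, backward for odds), instead of two independent sorted(set()) calls over separately accumulated lists.
import Mathlib
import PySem

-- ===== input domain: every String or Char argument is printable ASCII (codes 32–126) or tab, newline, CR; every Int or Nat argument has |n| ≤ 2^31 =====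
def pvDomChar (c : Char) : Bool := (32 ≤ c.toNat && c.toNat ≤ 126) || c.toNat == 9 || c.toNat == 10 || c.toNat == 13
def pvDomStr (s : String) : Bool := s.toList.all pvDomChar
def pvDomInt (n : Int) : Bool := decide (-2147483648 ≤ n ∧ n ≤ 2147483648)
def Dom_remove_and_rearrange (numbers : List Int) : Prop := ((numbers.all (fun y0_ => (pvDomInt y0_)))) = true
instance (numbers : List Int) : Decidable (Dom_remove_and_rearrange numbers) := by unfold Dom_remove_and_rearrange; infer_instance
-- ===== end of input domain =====

-- B replaces A's two independent sorted(set()) calls by one sort of the deduplicated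
-- non-3 values, read forward for evens and backward for odds (alternative decomposition).

-- ===== PORT A =====
-- one pass appending into (removed, evens, odds), then sorted(set(evens)) asc and sorted(set(odds)) desc
def remove_and_rearrange (numbers : List Int) : List Int × List Int :=
  let st := numbers.foldl
    (fun (acc : List Int × List Int × List Int) num =>
      if num == 3 then (acc.1 ++ [num], acc.2.1, acc.2.2)
      else if PySem.Int.mod num 2 == 0 then (acc.1, acc.2.1 ++ [num], acc.2.2)
      else (acc.1, acc.2.1, acc.2.2 ++ [num]))
    ([], [], [])
  let even_numbers := PySem.List.sorted (PySem.Set.ofList st.2.1) (fun x => x) false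
  let odd_numbers := PySem.List.sorted (PySem.Set.ofList st.2.2) (fun x => x) true
  (even_numbers ++ odd_numbers, st.1)

-- ===== PORT B =====
def remove_and_rearrange_alt (numbers : List Int) : List Int × List Int :=
  let removed_elements := numbers.filter (fun n => n == 3)
  let s := PySem.List.sorted (PySem.Set.ofList (numbers.filter (fun n => !(n == 3)))) (fun x => x) false
  let evens := s.filter (fun x => PySem.Int.mod x 2 == 0)
  let odds := s.reverse.filter (fun x => !(PySem.Int.mod x 2 == 0))
  (evens ++ odds, removed_elements)

-- ===== PRECONDITION & SPEC =====
def Spec_remove_and_rearrange (numbers : List Int) (out : List Int × List Int) : Prop := out = remove_and_rearrange_alt numbers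
instance (numbers : List Int) (out : List Int × List Int) : Decidable (Spec_remove_and_rearrange numbers out) := by unfold Spec_remove_and_rearrange; infer_instance

-- ===== CLAIM (what is proved, stated in full; the proofs are below) =====
def Claim_equal_remove_and_rearrange : Prop := ∀ (numbers : List Int), Dom_remove_and_rearrange numbers → Spec_remove_and_rearrange numbers (remove_and_rearrange numbers)

-- ===== LEMMAS AND PROOFS =====

-- A's single pass is three filters
theorem pv_fold_eq_filters (numbers : List Int) (r e o : List Int) :
    numbers.foldl
      (fun (acc : List Int × List Int × List Int) num =>
        if num == 3 then (acc.1 ++ [num], acc.2.1, acc.2.2)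
        else if PySem.Int.mod num 2 == 0 then (acc.1, acc.2.1 ++ [num], acc.2.2)
        else (acc.1, acc.2.1, acc.2.2 ++ [num]))
      (r, e, o)
    = (r ++ numbers.filter (fun n => n == 3),
       e ++ numbers.filter (fun n => !(n == 3) && (PySem.Int.mod n 2 == 0)),
       o ++ numbers.filter (fun n => !(n == 3) && !(PySem.Int.mod n 2 == 0))) := by
  induction numbers generalizing r e o with
  | nil => simp
  | cons x xs ih =>
    simp only [List.foldl_cons, List.filter_cons]
    cases h3 : (x == 3) with
    | true =>
      have hx : x = 3 := by simpa using h3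
      subst hx
      simp only [if_true, Bool.not_true, Bool.false_and, Bool.false_eq_true,
        if_false, ih, List.append_assoc, List.singleton_append]
    | false =>
      cases he : (PySem.Int.mod x 2 == 0) with
      | true =>
        simp only [Bool.false_eq_true, Bool.not_true, Bool.not_false, Bool.true_and,
          if_true, if_false, ih, List.append_assoc, List.singleton_append]
      | false =>
        simp only [Bool.false_eq_true, Bool.not_false, Bool.true_and,
          if_true, if_false, ih, List.append_assoc, List.singleton_append]

-- a sorted-set list is strictly increasing, nodup, and has the source's membership
theorem pv_s_pairwise (l : List Int) :
    (PySem.List.sorted (PySem.Set.ofList l) (fun x => x) false).Pairwise (· < ·) :=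
  PySem.List.sorted_ofList_pairwise_lt l

theorem pv_s_nodup (l : List Int) :
    (PySem.List.sorted (PySem.Set.ofList l) (fun x => x) false).Nodup :=
  (pv_s_pairwise l).imp (fun h => ne_of_lt h)

-- the filtered sorted combined list is a permutation of the sorted set of the
-- correspondingly filtered source
theorem pv_filter_perm (l : List Int) (p : Int → Bool) :
    ((PySem.List.sorted (PySem.Set.ofList l) (fun x => x) false).filter p).Perm
      (PySem.Set.ofList (l.filter p)) := by
  rw [List.perm_ext_iff_of_nodup ((pv_s_nodup l).filter p) (PySem.Set.nodup_ofList _)]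
  intro a
  simp [List.mem_filter, PySem.Set.mem_ofList]

theorem pv_evens_eq (l : List Int) :
    PySem.List.sorted (PySem.Set.ofList (l.filter (fun x => PySem.Int.mod x 2 == 0))) (fun x => x) false
      = (PySem.List.sorted (PySem.Set.ofList l) (fun x => x) false).filter (fun x => PySem.Int.mod x 2 == 0) := by
  apply PySem.List.sorted_eq_of_perm_of_pairwise_lt
  · exact pv_filter_perm l _
  · exact (pv_s_pairwise l).filter _

theorem pv_odds_eq (l : List Int) :
    PySem.List.sorted (PySem.Set.ofList (l.filter (fun x => !(PySem.Int.mod x 2 == 0)))) (fun x => x) true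
      = (PySem.List.sorted (PySem.Set.ofList l) (fun x => x) false).reverse.filter (fun x => !(PySem.Int.mod x 2 == 0)) := by
  apply PySem.List.sorted_rev_eq_of_perm_of_pairwise_gt
  · exact (List.reverse_perm _).filter _ |>.trans (pv_filter_perm l _)
  · exact (List.pairwise_reverse.mpr ((pv_s_pairwise l).imp (fun h => h))).filter _

-- filter-of-filter on both sides named as filters of the same source list
theorem pv_filter_and (l : List Int) (p : Int → Bool) :
    (l.filter (fun n => !(n == 3))).filter p = l.filter (fun n => !(n == 3) && p n) := by
  rw [List.filter_filter]
  exact List.filter_congr (by intro x _; simp [Bool.and_comm])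

-- ===== VERDICT (by name: the statement is the Claim_ definition above) =====
theorem remove_and_rearrange_spec : Claim_equal_remove_and_rearrange := by
  intro numbers _
  unfold Spec_remove_and_rearrange remove_and_rearrange remove_and_rearrange_alt
  simp only [pv_fold_eq_filters, List.nil_append]
  rw [← pv_filter_and numbers (fun x => PySem.Int.mod x 2 == 0),
      ← pv_filter_and numbers (fun x => !(PySem.Int.mod x 2 == 0)),
      pv_evens_eq, pv_odds_eq]
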